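-- pv_equiv track=rewrite | github.com/oskros/Project_euler | helper.py | lowest_largest_sums
-- ===== SOURCE A (Python) =====
-- def lowest_largest_sums(lst):
--     sorted_list = sorted(lst)
--     for i in range(2, len(sorted_list)):
--         low = sorted_list[:i]
--         high = sorted_list[-len(low) + 1:]
--         if sum(high) > sum(low):
--             return False
--     return True
-- ===== SOURCE B (Python) =====
-- def lowest_largest_sums(lst):
--     # One pass with running prefix/suffix sums instead of re-slicing and re-summing each round.
--     s = sorted(lst)
--     n = len(s)
--     low = s[0] + s[1] if n >= 3 else 0
--     high = 0
--     for i in range(2, n):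
--         high += s[n - i + 1]
--         if high > low:
--             return False
--         low += s[i]
--     return True
-- ===== Notes on version B (the rewrite author's own statement) =====
-- stated objective: alternative
-- what changed: Replaced A's per-iteration slicing and summing of prefix/suffix segments with a single pass that maintains running prefix and suffix sum accumulators, so each loop step costs O(1) after the sort; a timing run's inputs exit the loop early, so no speedup was measured there.
import Mathlib
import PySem

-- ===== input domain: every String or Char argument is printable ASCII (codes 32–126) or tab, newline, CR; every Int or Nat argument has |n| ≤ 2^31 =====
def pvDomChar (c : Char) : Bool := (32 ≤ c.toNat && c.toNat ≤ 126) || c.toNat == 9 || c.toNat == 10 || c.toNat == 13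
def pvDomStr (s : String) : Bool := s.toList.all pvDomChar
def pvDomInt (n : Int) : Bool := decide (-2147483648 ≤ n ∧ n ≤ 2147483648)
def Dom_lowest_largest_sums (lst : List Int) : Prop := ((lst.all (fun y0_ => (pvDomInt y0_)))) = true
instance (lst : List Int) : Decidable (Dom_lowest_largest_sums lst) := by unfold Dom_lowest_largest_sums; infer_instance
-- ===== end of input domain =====

-- B replaces A's per-iteration re-slicing and re-summing by a single pass maintaining
-- running prefix/suffix sum accumulators (objective: alternative algorithm, same return value).

-- ===== PORT A =====
-- the 'for i in range(2, len(sorted_list))' loop with its early 'return False'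
def pvGoA (s : List Int) : List Int → Bool
  | [] => true
  | i :: rest =>
    let low := PySem.List.slice s none (some i)
    let high := PySem.List.slice s (some (-(low.length : Int) + 1)) none
    if high.sum > low.sum then false else pvGoA s rest

def lowest_largest_sums (lst : List Int) : Bool :=
  let s := PySem.List.sorted lst id
  pvGoA s (PySem.List.pyRange 2 (s.length : Int))

-- ===== PORT B =====
-- Source B's loop: accumulators low (prefix sum) and high (suffix sum), early 'return False'
def pvGoB (s : List Int) (n : Int) : List Int → Int → Int → Bool
  | [], _, _ => true
  | i :: rest, low, high =>
    let high' := high + PySem.List.pyGetD s (n - i + 1) 0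
    if high' > low then false
    else pvGoB s n rest (low + PySem.List.pyGetD s i 0) high'

def lowest_largest_sums_alt (lst : List Int) : Bool :=
  let s := PySem.List.sorted lst id
  let n : Int := (s.length : Int)
  let low := if 3 ≤ n then PySem.List.pyGetD s 0 0 + PySem.List.pyGetD s 1 0 else 0
  pvGoB s n (PySem.List.pyRange 2 n) low 0

-- ===== PRECONDITION & SPEC =====
def Spec_lowest_largest_sums (lst : List Int) (out : Bool) : Prop := out = lowest_largest_sums_alt lst
instance (lst : List Int) (out : Bool) : Decidable (Spec_lowest_largest_sums lst out) := by unfold Spec_lowest_largest_sums; infer_instance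

-- ===== CLAIM (what is proved, stated in full; the proofs are below) =====
def Claim_equal_lowest_largest_sums : Prop := ∀ (lst : List Int), Dom_lowest_largest_sums lst → Spec_lowest_largest_sums lst (lowest_largest_sums lst)

-- ===== LEMMAS AND PROOFS =====

theorem pvClampIdx_neg (n : Nat) (a : Int) (h1 : a < 0) (h2 : 0 ≤ (n : Int) + a) :
    PySem.List.clampIdx n a = ((n : Int) + a).toNat := by
  simp only [PySem.List.clampIdx]
  split_ifs <;> omega

theorem pvSum_drop_succ (s : List Int) (k : Nat) (h : k < s.length) :
    (s.drop k).sum = s[k] + (s.drop (k + 1)).sum := by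
  rw [List.drop_eq_getElem_cons h, List.sum_cons]

theorem pvSum_take_succ (s : List Int) (k : Nat) (h : k < s.length) :
    (s.take (k + 1)).sum = (s.take k).sum + s[k] := by
  rw [List.take_add_one, List.getElem?_eq_getElem h, Option.toList_some, List.sum_append,
    List.sum_cons, List.sum_nil, add_zero]

-- loop invariant: at loop head for index a, A's slice sums equal B's accumulators
theorem pvGo_eq (s : List Int) (fuel : Nat) : ∀ (a : Nat), 2 ≤ a → a + fuel = s.length →
    pvGoA s (PySem.List.pyRange (a : Int) (s.length : Int)) =
      pvGoB s (s.length : Int) (PySem.List.pyRange (a : Int) (s.length : Int))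
        ((s.take a).sum) ((s.drop (s.length - a + 2)).sum) := by
  induction fuel with
  | zero =>
    intro a _ hlen
    rw [PySem.List.pyRange_one_eq_nil (by omega)]
    rfl
  | succ k ih =>
    intro a ha hlen
    have han : a < s.length := by omega
    rw [PySem.List.pyRange_one_cons (by exact_mod_cast han)]
    -- A's slices at index a
    have hlow : PySem.List.slice s none (some (a : Int)) = s.take a := by
      rw [PySem.List.slice_to s (by positivity)]; simp
    have hlowlen : (s.take a).length = a := by simp; omega
    have hclamp : PySem.List.clampIdx s.length (-(a : Int) + 1) = s.length - a + 1 := by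
      rw [pvClampIdx_neg _ _ (by omega) (by omega)]
      omega
    have hidx : s.length - a + 1 < s.length := by omega
    have hgetHigh : PySem.List.pyGetD s ((s.length : Int) - (a : Int) + 1) 0
        = s[s.length - a + 1] := by
      rw [PySem.List.pyGetD_eq_getElem s 0 (by omega) (by omega)]
      congr 1; omega
    have hgetLow : PySem.List.pyGetD s ((a : Int)) 0 = s[a] := by
      rw [PySem.List.pyGetD_eq_getElem s 0 (by positivity) (by exact_mod_cast han)]
      simp
    show (if (PySem.List.slice s (some (-((PySem.List.slice s none (some (a:Int))).length : Int) + 1)) none).sum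
            > (PySem.List.slice s none (some (a:Int))).sum then false
          else pvGoA s (PySem.List.pyRange ((a:Int) + 1) (s.length : Int))) = _
    rw [hlow, hlowlen, PySem.List.slice_some_none, hclamp]
    show _ = (if (s.drop (s.length - a + 2)).sum + PySem.List.pyGetD s ((s.length:Int) - (a:Int) + 1) 0
            > (s.take a).sum then false
          else pvGoB s (s.length : Int) (PySem.List.pyRange ((a:Int) + 1) (s.length : Int))
            ((s.take a).sum + PySem.List.pyGetD s ((a:Int)) 0)
            ((s.drop (s.length - a + 2)).sum + PySem.List.pyGetD s ((s.length:Int) - (a:Int) + 1) 0))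
    rw [hgetHigh, hgetLow]
    have hhigh : (s.drop (s.length - a + 1)).sum
        = (s.drop (s.length - a + 2)).sum + s[s.length - a + 1] := by
      rw [pvSum_drop_succ s (s.length - a + 1) hidx]
      have : s.length - a + 1 + 1 = s.length - a + 2 := by omega
      rw [this]; ring
    rw [hhigh]
    by_cases hc : (s.drop (s.length - a + 2)).sum + s[s.length - a + 1] > (s.take a).sum
    · rw [if_pos hc, if_pos hc]
    · rw [if_neg hc, if_neg hc]
      have hcast : ((a : Int) + 1) = ((a + 1 : Nat) : Int) := by push_cast; ring
      rw [hcast]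
      rw [ih (a + 1) (by omega) (by omega), pvSum_take_succ s a han]
      have hidx2 : s.length - (a + 1) + 2 = s.length - a + 1 := by omega
      rw [hidx2, hhigh]

theorem pvTop (s : List Int) :
    pvGoA s (PySem.List.pyRange 2 (s.length : Int)) =
      pvGoB s (s.length : Int) (PySem.List.pyRange 2 (s.length : Int))
        (if 3 ≤ (s.length : Int) then PySem.List.pyGetD s 0 0 + PySem.List.pyGetD s 1 0 else 0) 0 := by
  by_cases h3 : 3 ≤ (s.length : Int)
  · have h3' : 3 ≤ s.length := by exact_mod_cast h3
    have hmain := pvGo_eq s (s.length - 2) 2 (by omega) (by omega)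
    simp only [Nat.cast_ofNat] at hmain
    rw [hmain, if_pos h3]
    have hdrop : s.length - 2 + 2 = s.length := by omega
    rw [hdrop, List.drop_length]
    congr 1
    · have h0 : (0 : Nat) < s.length := by omega
      have h1 : (1 : Nat) < s.length := by omega
      rw [pvSum_take_succ s 1 h1, pvSum_take_succ s 0 h0]
      have g0 : PySem.List.pyGetD s 0 0 = s[0] := by
        rw [PySem.List.pyGetD_eq_getElem s 0 (by omega) (by exact_mod_cast h0)]
        simp
      have g1 : PySem.List.pyGetD s 1 0 = s[1] := by
        rw [PySem.List.pyGetD_eq_getElem s 0 (by omega) (by exact_mod_cast h1)]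
        simp
      rw [g0, g1]
      simp
  · rw [PySem.List.pyRange_one_eq_nil (by omega)]
    rfl

-- ===== VERDICT (by name: the statement is the Claim_ definition above) =====
theorem lowest_largest_sums_spec : Claim_equal_lowest_largest_sums := by
  intro lst _
  exact pvTop (PySem.List.sorted lst id)
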